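-- pv_equiv track=rewrite | github.com/AnnaSidorovaMEPHI/Steganography | functions.py | extract_secret
-- ===== SOURCE A (Python) =====
-- def extract_secret(binary_secret):
--     parsed = []
--     part = ''
--     step = 0
--     for i in binary_secret:
--         part += i
--         step += 1
--         if step == 8:
--             if part != '00000000':
--                 parsed.append(part)
--                 part = ''
--                 step = 0
--
--     secret = ''
--     for part in parsed:
--         secret += chr(int(part, 2))
--     return secret
-- ===== SOURCE B (Python) =====
-- def extract_secret(binary_secret):
--     secret = ''
--     for i in range(0, len(binary_secret) - 7, 8):
--         chunk = binary_secret[i:i+8]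
--         if chunk == '00000000':
--             break
--         secret += chr(int(chunk, 2))
--     return secret
-- ===== Notes on version B (the rewrite author's own statement) =====
-- stated objective: simpler
-- what changed: Replaced A's two sequential passes (a char-by-char accumulator with a non-resetting step counter that silently poisons the loop at the first all-zero chunk, then a decode pass over the collected chunks) by one direct loop over 8-aligned slice offsets that decodes each chunk immediately and breaks explicitly at the first all-zero chunk.
import Mathlib
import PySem

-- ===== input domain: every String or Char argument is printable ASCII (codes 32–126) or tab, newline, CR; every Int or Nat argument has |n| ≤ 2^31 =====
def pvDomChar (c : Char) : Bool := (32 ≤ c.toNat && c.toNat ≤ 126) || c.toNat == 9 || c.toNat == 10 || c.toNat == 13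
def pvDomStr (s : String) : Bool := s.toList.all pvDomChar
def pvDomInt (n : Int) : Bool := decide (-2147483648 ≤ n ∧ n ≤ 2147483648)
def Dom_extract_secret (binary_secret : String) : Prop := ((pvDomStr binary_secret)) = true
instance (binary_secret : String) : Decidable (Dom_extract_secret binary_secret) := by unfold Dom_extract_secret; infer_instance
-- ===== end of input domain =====

-- B replaces A's two passes (char-by-char accumulator with a non-resetting counter, then a
-- decode pass) by one loop over 8-aligned slices with an explicit break at the first all-zero
-- chunk; objective: simpler.

-- ===== PORT A =====
-- the all-zero terminator chunk
def pvZeros : List Char := ['0', '0', '0', '0', '0', '0', '0', '0']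

-- chr(int(part, 2)) : exact wherever int(part, 2) succeeds with a nonnegative value
-- (which Pre_ guarantees for every chunk that is actually decoded)
def pvDecode (part : List Char) : Char :=
  Char.ofNat ((PySem.Int.ofCharsBase? part 2).getD 0).toNat

-- the body of A's first for-loop, state = (parsed, part, step)
def pvLoopA (st : List (List Char) × List Char × Int) (i : Char) :
    List (List Char) × List Char × Int :=
  let parsed := st.1
  let part := st.2.1 ++ [i]
  let step := st.2.2 + 1
  if step = 8 then
    if part ≠ pvZeros then (parsed ++ [part], [], 0) else (parsed, part, step)
  else (parsed, part, step)

def extract_secret (binary_secret : String) : String :=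
  String.ofList ((binary_secret.toList.foldl pvLoopA ([], [], 0)).1.foldl
    (fun secret part => secret ++ [pvDecode part]) [])

-- ===== PORT B =====
-- B's for-loop over range(0, len-7, 8) with break, state = secret
def pvLoopB (cs : List Char) : List Int → List Char → List Char
  | [], secret => secret
  | i :: rest, secret =>
    let chunk := PySem.List.slice cs (some i) (some (i + 8))
    if chunk = pvZeros then secret
    else pvLoopB cs rest (secret ++ [pvDecode chunk])

def extract_secret_alt (binary_secret : String) : String :=
  String.ofList (pvLoopB binary_secret.toList
    (PySem.List.pyRange 0 (PySem.Str.len binary_secret - 7) 8) [])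

-- ===== PRECONDITION & SPEC =====
-- the k-th full 8-char chunk of the input
def pvChunkAt (l : List Char) (k : Nat) : List Char := (l.drop (8 * k)).take 8
-- Pre_ holds exactly where the Python A returns: every full 8-char chunk that precedes the
-- first all-zero chunk must parse under int(·, 2) to a nonnegative value (otherwise
-- int(part, 2) raises ValueError, or chr raises for the negative value of a '-…' chunk).
def Pre_extract_secret (binary_secret : String) : Prop :=
  ∀ k < binary_secret.toList.length / 8,
    (∃ k' ≤ k, pvChunkAt binary_secret.toList k' = pvZeros) ∨
    0 ≤ (PySem.Int.ofCharsBase? (pvChunkAt binary_secret.toList k) 2).getD (-1)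
instance (binary_secret : String) : Decidable (Pre_extract_secret binary_secret) := by
  unfold Pre_extract_secret; infer_instance

def pvWitness_extract_secret : String := "0100000101000010"

def Spec_extract_secret (binary_secret : String) (out : String) : Prop :=
  out = extract_secret_alt binary_secret
instance (binary_secret : String) (out : String) : Decidable (Spec_extract_secret binary_secret out) := by
  unfold Spec_extract_secret; infer_instance

-- ===== CLAIM (what is proved, stated in full; the proofs are below) =====
def Claim_equal_extract_secret : Prop := ∀ (binary_secret : String), Dom_extract_secret binary_secret → Pre_extract_secret binary_secret → Spec_extract_secret binary_secret (extract_secret binary_secret)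

-- ===== LEMMAS AND PROOFS =====

-- the common characterisation: the list of full 8-char chunks up to the first zero chunk
def pvChunks (l : List Char) : List (List Char) :=
  if _h : 8 ≤ l.length then
    if l.take 8 = pvZeros then [] else l.take 8 :: pvChunks (l.drop 8)
  else []
termination_by l.length
decreasing_by simp; omega

-- once A's counter has passed 8 without resetting, nothing is ever appended again
theorem pvLoopA_poison (l : List Char) : ∀ (parsed : List (List Char)) (part : List Char)
    (step : Int), 8 ≤ step → (l.foldl pvLoopA (parsed, part, step)).1 = parsed := by
  induction l with
  | nil => intro parsed part step _; rfl
  | cons a t ih =>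
    intro parsed part step h
    have hne : ¬ (step + 1 = 8) := by omega
    simp only [List.foldl_cons, pvLoopA, hne, if_false]
    exact ih parsed (part ++ [a]) (step + 1) (by omega)

-- fewer than 8 chars left before the counter reaches 8: parsed is unchanged
theorem pvLoopA_short (l : List Char) : ∀ (parsed : List (List Char)) (part : List Char)
    (step : Int), 0 ≤ step → step + l.length < 8 →
    (l.foldl pvLoopA (parsed, part, step)).1 = parsed := by
  induction l with
  | nil => intro parsed part step _ _; rfl
  | cons a t ih =>
    intro parsed part step h0 hlt
    have hne : ¬ (step + 1 = 8) := by simp at hlt ⊢; omega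
    simp only [List.foldl_cons, pvLoopA, hne, if_false]
    exact ih parsed (part ++ [a]) (step + 1) (by omega) (by simp at hlt ⊢; omega)

-- one full chunk from a clean state
theorem pvLoopA_eight (parsed : List (List Char)) (a b c d e f g h : Char) (rest : List Char) :
    (a :: b :: c :: d :: e :: f :: g :: h :: rest).foldl pvLoopA (parsed, [], 0) =
      if [a, b, c, d, e, f, g, h] = pvZeros then
        rest.foldl pvLoopA (parsed, [a, b, c, d, e, f, g, h], 8)
      else rest.foldl pvLoopA (parsed ++ [[a, b, c, d, e, f, g, h]], [], 0) := by
  by_cases hz : [a, b, c, d, e, f, g, h] = pvZeros <;>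
    simp [pvLoopA, hz]

-- A's first loop computes pvChunks
theorem pvLoopA_chunks : ∀ (n : Nat) (l : List Char), l.length ≤ n →
    ∀ (parsed : List (List Char)),
    (l.foldl pvLoopA (parsed, [], 0)).1 = parsed ++ pvChunks l := by
  intro n
  induction n with
  | zero =>
    intro l hl parsed
    have : l = [] := List.eq_nil_of_length_eq_zero (by omega)
    subst this
    rw [pvChunks]; simp
  | succ n ih =>
    intro l hl parsed
    match l with
    | [] => rw [pvChunks]; simp
    | [a] => simpa [pvChunks] using pvLoopA_short [a] parsed [] 0 (by norm_num) (by norm_num)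
    | [a, b] => simpa [pvChunks] using pvLoopA_short [a, b] parsed [] 0 (by norm_num) (by norm_num)
    | [a, b, c] => simpa [pvChunks] using pvLoopA_short [a, b, c] parsed [] 0 (by norm_num) (by norm_num)
    | [a, b, c, d] => simpa [pvChunks] using pvLoopA_short [a, b, c, d] parsed [] 0 (by norm_num) (by norm_num)
    | [a, b, c, d, e] => simpa [pvChunks] using pvLoopA_short [a, b, c, d, e] parsed [] 0 (by norm_num) (by norm_num)
    | [a, b, c, d, e, f] => simpa [pvChunks] using pvLoopA_short [a, b, c, d, e, f] parsed [] 0 (by norm_num) (by norm_num)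
    | [a, b, c, d, e, f, g] => simpa [pvChunks] using pvLoopA_short [a, b, c, d, e, f, g] parsed [] 0 (by norm_num) (by norm_num)
    | a :: b :: c :: d :: e :: f :: g :: h :: rest =>
      rw [pvLoopA_eight, pvChunks]
      have hlen : rest.length ≤ n := by simp at hl; omega
      by_cases hz : [a, b, c, d, e, f, g, h] = pvZeros
      · simp [hz, pvLoopA_poison rest parsed _ 8 (by norm_num)]
      · simp [hz, ih rest hlen (parsed ++ [[a, b, c, d, e, f, g, h]])]

-- A equals decode-map over pvChunks
theorem extract_secret_eq_chunks (s : String) :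
    extract_secret s = String.ofList ((pvChunks s.toList).map pvDecode) := by
  unfold extract_secret
  rw [PySem.List.foldl_append_singleton_eq_map,
    pvLoopA_chunks s.toList.length s.toList le_rfl []]
  simp

-- step-8 range: induction forms
theorem pyRange8_nil (a b : Int) (h : b ≤ a) : PySem.List.pyRange a b 8 = [] := by
  rw [PySem.List.pyRange_of_pos a b (by norm_num)]
  simp [if_neg (by omega : ¬ a < b)]

theorem pyRange8_cons (a b : Int) (h : a < b) :
    PySem.List.pyRange a b 8 = a :: PySem.List.pyRange (a + 8) b 8 := by
  rw [PySem.List.pyRange_of_pos a b (by norm_num),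
    PySem.List.pyRange_of_pos (a + 8) b (by norm_num)]
  by_cases h8 : a + 8 < b
  · rw [if_pos h, if_pos h8]
    have hcnt : ((b - a + 8 - 1) / 8).toNat = ((b - (a + 8) + 8 - 1) / 8).toNat + 1 := by
      omega
    rw [hcnt, List.range_succ_eq_map]
    simp [List.map_map, Function.comp]
    intro k _
    ring
  · rw [if_pos h, if_neg h8]
    have hcnt : ((b - a + 8 - 1) / 8).toNat = 1 := by omega
    simp [hcnt, List.range_succ]

-- B's loop computes decode-map over pvChunks of the remaining suffix
theorem pvLoopB_chunks : ∀ (n : Nat) (l : List Char) (j : Nat), l.length - j ≤ n →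
    ∀ (acc : List Char),
    pvLoopB l (PySem.List.pyRange (j : Int) ((l.length : Int) - 7) 8) acc =
      acc ++ (pvChunks (l.drop j)).map pvDecode := by
  intro n
  induction n with
  | zero =>
    intro l j hj acc
    rw [pyRange8_nil _ _ (by omega), pvChunks]
    have : (l.drop j).length = 0 := by simp; omega
    simp [pvLoopB, this]
  | succ n ih =>
    intro l j hj acc
    by_cases hfull : j + 8 ≤ l.length
    · rw [pyRange8_cons _ _ (by omega)]
      have hsl : PySem.List.slice l (some (j : Int)) (some ((j : Int) + 8)) =
          (l.drop j).take 8 := by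
        have := PySem.List.slice_natCast_add l j 8
        simpa using this
      rw [pvChunks]
      have h8 : 8 ≤ (l.drop j).length := by simp; omega
      by_cases hz : (l.drop j).take 8 = pvZeros
      · simp [pvLoopB, hsl, hz]
      · have hcast : ((j : Int) + 8) = ((j + 8 : Nat) : Int) := by push_cast; ring
        have hrec := ih l (j + 8) (by omega) (acc ++ [pvDecode ((l.drop j).take 8)])
        have hdd : l.drop (j + 8) = (l.drop j).drop 8 := by
          rw [List.drop_drop]
        rw [hdd] at hrec
        simp only [pvLoopB]
        rw [hsl, if_neg hz, hcast, hrec, dif_pos h8]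
        simp [hz]
    · rw [pyRange8_nil _ _ (by omega), pvChunks]
      simp [pvLoopB]
      intro h
      omega

theorem extract_secret_alt_eq_chunks (s : String) :
    extract_secret_alt s = String.ofList ((pvChunks s.toList).map pvDecode) := by
  unfold extract_secret_alt
  have h := pvLoopB_chunks s.toList.length s.toList 0 (by omega) []
  simp only [Nat.cast_zero, List.drop_zero, List.nil_append] at h
  rw [show PySem.Str.len s = (s.toList.length : Int) by simp [PySem.Str.len_eq], h]

-- ===== VERDICT (by name: the statement is the Claim_ definition above) =====
theorem extract_secret_spec : Claim_equal_extract_secret := by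
  intro s _ _
  unfold Spec_extract_secret
  rw [extract_secret_eq_chunks, extract_secret_alt_eq_chunks]
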